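-- pv_equiv track=rewrite | github.com/PRASHMANE/DSA_IN_LeetCode | 2650-split-with-minimum-sum/split-with-minimum-sum.py | splitNum
-- ===== SOURCE A (Python) =====
-- def splitNum(num: int) -> int:
--     digits = sorted(map(int, str(num)))
--     num1 = num2 = 0
--
--     for i, d in enumerate(digits):
--         if i % 2 == 0:
--             num1 = num1 * 10 + d
--         else:
--             num2 = num2 * 10 + d
--
--     return num1 + num2
-- ===== SOURCE B (Python) =====
-- def splitNum(num: int) -> int:
--     # Counting-sort over digit values instead of comparison sort.
--     cnt = [0] * 10
--     for c in str(num):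
--         cnt[int(c)] += 1
--     num1 = num2 = 0
--     i = 0
--     for v in range(10):
--         for _ in range(cnt[v]):
--             if i % 2 == 0:
--                 num1 = num1 * 10 + v
--             else:
--                 num2 = num2 * 10 + v
--             i += 1
--     return num1 + num2
-- ===== Notes on version B (the rewrite author's own statement) =====
-- stated objective: alternative
-- what changed: Replaces the comparison sort of the digit list by a counting sort: a fixed-size count array over digit values filled in one pass over str(num), then a walk over the digit values in increasing order emitting each digit into num1/num2 with one global alternation index.
import Mathlib
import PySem

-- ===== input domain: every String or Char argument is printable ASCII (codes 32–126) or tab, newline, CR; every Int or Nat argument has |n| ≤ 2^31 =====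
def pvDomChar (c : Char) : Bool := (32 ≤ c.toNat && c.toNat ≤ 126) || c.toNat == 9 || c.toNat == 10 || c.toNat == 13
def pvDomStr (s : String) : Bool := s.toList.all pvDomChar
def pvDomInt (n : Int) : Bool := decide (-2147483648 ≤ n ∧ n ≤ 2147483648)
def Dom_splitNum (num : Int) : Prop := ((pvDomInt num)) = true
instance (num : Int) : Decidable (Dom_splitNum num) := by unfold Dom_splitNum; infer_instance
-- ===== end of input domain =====

-- B replaces A's comparison sort of the digits by a counting-sort bucket pass
-- (count array over digit values 0..9, one global alternation index); objective: alternative.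


-- ===== PORT A =====
-- int(c) on a one-character string: PySem.Int.ofChars? [c]; the .getD 0 is never taken on
-- Pre_ (str(num) of a nonnegative int consists of digit characters only).
def splitA_step (p : Int × Int) (id : Int × Int) : Int × Int :=
  if PySem.Int.mod id.1 2 == 0 then (p.1 * 10 + id.2, p.2) else (p.1, p.2 * 10 + id.2)

def splitNum (num : Int) : Int :=
  let digits := PySem.List.sorted
    ((PySem.Int.toChars num).map (fun c => (PySem.Int.ofChars? [c]).getD 0)) (fun d => d) false
  let p := (PySem.List.enumerate digits 0).foldl splitA_step (0, 0)
  p.1 + p.2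

-- ===== PORT B =====
-- cnt[int(c)] += 1 : the index int(c) is 0..9 on Pre_, so List.set/pyGetD are exact there.
def splitB_cntStep (cnt : List Int) (c : Char) : List Int :=
  cnt.set ((PySem.Int.ofChars? [c]).getD 0).toNat
    (PySem.List.pyGetD cnt ((PySem.Int.ofChars? [c]).getD 0) 0 + 1)

-- state (num1, num2, i); one alternation step emitting digit v
def splitB_emit (st : Int × Int × Int) (v : Int) : Int × Int × Int :=
  if PySem.Int.mod st.2.2 2 == 0 then (st.1 * 10 + v, st.2.1, st.2.2 + 1)
  else (st.1, st.2.1 * 10 + v, st.2.2 + 1)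

def splitNum_alt (num : Int) : Int :=
  let cnt := (PySem.Int.toChars num).foldl splitB_cntStep (List.replicate 10 (0 : Int))
  let st := (PySem.List.pyRange 0 10 1).foldl
    (fun st v =>
      (PySem.List.pyRange 0 (PySem.List.pyGetD cnt v 0) 1).foldl (fun s _ => splitB_emit s v) st)
    ((0 : Int), (0 : Int), (0 : Int))
  st.1 + st.2.1

-- ===== PRECONDITION & SPEC =====
-- Pre_ excludes negative num, on which both Pythons raise ValueError (int('-')).
def Pre_splitNum (num : Int) : Prop := 0 ≤ num
instance (num : Int) : Decidable (Pre_splitNum num) := by unfold Pre_splitNum; infer_instance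
def pvWitness_splitNum : Int := (4325)

def Spec_splitNum (num : Int) (out : Int) : Prop := out = splitNum_alt num
instance (num : Int) (out : Int) : Decidable (Spec_splitNum num out) := by unfold Spec_splitNum; infer_instance

-- ===== CLAIM (what is proved, stated in full; the proofs are below) =====
def Claim_equal_splitNum : Prop := ∀ (num : Int), Dom_splitNum num → Pre_splitNum num → Spec_splitNum num (splitNum num)

-- ===== LEMMAS AND PROOFS =====

-- the integer value int(c) of a single character, 0 when c is not a digit
def pvDval (c : Char) : Int := (PySem.Int.ofChars? [c]).getD 0

lemma pvDval_digitChar (k : Nat) (hk : k < 10) : pvDval (Nat.digitChar k) = (k : Int) := by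
  interval_cases k <;> decide

lemma toDigitsCore_mem (f : Nat) : ∀ (n : Nat) (l : List Char) (c : Char),
    c ∈ Nat.toDigitsCore 10 f n l → c ∈ l ∨ ∃ k : Nat, k < 10 ∧ c = Nat.digitChar k := by
  induction f with
  | zero => intro n l c h; exact Or.inl h
  | succ f ih =>
    intro n l c h
    simp only [Nat.toDigitsCore] at h
    by_cases h0 : n / 10 = 0
    · rw [if_pos h0] at h
      rcases List.mem_cons.mp h with h | h
      · exact Or.inr ⟨n % 10, Nat.mod_lt _ (by omega), h⟩
      · exact Or.inl h
    · rw [if_neg h0] at h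
      rcases ih (n / 10) _ c h with h | h
      · rcases List.mem_cons.mp h with h | h
        · exact Or.inr ⟨n % 10, Nat.mod_lt _ (by omega), h⟩
        · exact Or.inl h
      · exact Or.inr h

lemma toChars_digits (num : Int) (h : 0 ≤ num) :
    ∀ c ∈ PySem.Int.toChars num, ∃ k : Nat, k < 10 ∧ pvDval c = (k : Int) := by
  intro c hc
  have hch : PySem.Int.toChars num = Nat.toDigits 10 num.toNat := by
    have hnl : ¬ num < 0 := by omega
    simp [PySem.Int.toChars, hnl]
  rw [hch] at hc
  rcases toDigitsCore_mem _ _ _ _ hc with h' | ⟨k, hk, rfl⟩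
  · simp at h'
  · exact ⟨k, hk, pvDval_digitChar k hk⟩

-- invariant of B's counting fold
lemma cnt_fold_spec : ∀ (cs : List Char), (∀ c ∈ cs, ∃ k : Nat, k < 10 ∧ pvDval c = (k : Int)) →
    ∀ (acc : List Int), acc.length = 10 →
    (cs.foldl splitB_cntStep acc).length = 10 ∧
    ∀ j : Nat, j < 10 → (cs.foldl splitB_cntStep acc).getD j 0
      = acc.getD j 0 + (cs.countP (fun c => pvDval c == (j : Int)) : Int) := by
  intro cs
  induction cs with
  | nil => intro _ acc hl; exact ⟨hl, by simp⟩
  | cons c cs ih =>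
    intro hall acc hl
    obtain ⟨k, hk, hdk⟩ := hall c (List.mem_cons_self ..)
    have hstep : splitB_cntStep acc c = acc.set k (acc.getD k 0 + 1) := by
      unfold splitB_cntStep
      unfold pvDval at hdk
      rw [hdk]
      simp [PySem.List.pyGetD_natCast]
    have hl' : (acc.set k (acc.getD k 0 + 1)).length = 10 := by simp [hl]
    obtain ⟨hL, hG⟩ := ih (fun c hc => hall c (List.mem_cons_of_mem _ hc)) _ hl'
    refine ⟨by simpa [hstep] using hL, fun j hj => ?_⟩
    have hcount : (c :: cs).countP (fun c => pvDval c == (j : Int))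
        = cs.countP (fun c => pvDval c == (j : Int)) + (if k = j then 1 else 0) := by
      rw [List.countP_cons]
      by_cases hkj : k = j <;> simp [hdk, hkj]
    have hset : (acc.set k (acc.getD k 0 + 1)).getD j 0
        = acc.getD j 0 + (if k = j then 1 else 0) := by
      by_cases hkj : k = j
      · subst hkj
        have hklt : k < acc.length := by omega
        simp [List.getD_eq_getElem?_getD, List.getElem?_set_self hklt]
      · simp [List.getD_eq_getElem?_getD, List.getElem?_set_ne hkj, hkj]
    rw [List.foldl_cons, hstep, hG j hj, hset, hcount]
    push_cast
    ring

-- general counting-sort facts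
lemma count_flatMap_replicate (vs : List Int) (hnd : vs.Nodup) (f : Int → Nat) (a : Int) :
    (vs.flatMap (fun v => List.replicate (f v) v)).count a = if a ∈ vs then f a else 0 := by
  induction vs with
  | nil => simp
  | cons v vs ih =>
    simp only [List.flatMap_cons, List.count_append, List.count_replicate,
      ih (List.Nodup.of_cons hnd)]
    rcases List.nodup_cons.mp hnd with ⟨hv, _⟩
    by_cases hva : v = a
    · subst hva
      simp [hv]
    · by_cases ha : a ∈ vs <;> simp [hva, ha, Ne.symm hva]

lemma pairwise_flatMap_replicate (vs : List Int) (h : vs.Pairwise (· < ·)) (f : Int → Nat) :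
    (vs.flatMap (fun v => List.replicate (f v) v)).Pairwise (· ≤ ·) := by
  induction vs with
  | nil => simp
  | cons v vs ih =>
    rcases List.pairwise_cons.mp h with ⟨hv, htl⟩
    simp only [List.flatMap_cons]
    rw [List.pairwise_append]
    refine ⟨List.pairwise_replicate.mpr (Or.inr le_rfl), ih htl, ?_⟩
    intro a ha b hb
    obtain rfl := List.eq_of_mem_replicate ha
    obtain ⟨u, hu, hbu⟩ := List.mem_flatMap.mp hb
    obtain rfl := List.eq_of_mem_replicate hbu
    exact le_of_lt (hv _ hu)

-- A's enumerate fold is B's triple-state fold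
lemma run_eq (ds : List Int) : ∀ (p : Int × Int) (i : Int),
    (PySem.List.enumerate ds i).foldl splitA_step p
      = ((ds.foldl splitB_emit (p.1, p.2, i)).1, (ds.foldl splitB_emit (p.1, p.2, i)).2.1) := by
  induction ds with
  | nil => intro p i; simp [PySem.List.enumerate_nil]
  | cons d ds ih =>
    intro p i
    rw [PySem.List.enumerate_cons, List.foldl_cons, List.foldl_cons]
    show (PySem.List.enumerate ds (i + 1)).foldl splitA_step (splitA_step p (i, d)) = _
    unfold splitA_step splitB_emit
    by_cases h : (PySem.Int.mod i 2 == 0) = true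
    · rw [if_pos h, if_pos (by simpa using h)]
      exact ih (p.1 * 10 + d, p.2) (i + 1)
    · rw [if_neg h, if_neg (by simpa using h)]
      exact ih (p.1, p.2 * 10 + d) (i + 1)

-- a fold that ignores the element only sees the length
lemma foldl_ignore {α β σ : Type} (g : σ → σ) :
    ∀ (l : List α) (l' : List β), l.length = l'.length → ∀ (s : σ),
    l.foldl (fun s _ => g s) s = l'.foldl (fun s _ => g s) s := by
  intro l
  induction l with
  | nil =>
    intro l' h s
    cases l' with
    | nil => rfl
    | cons y t => simp at h
  | cons x l ih =>
    intro l' h s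
    cases l' with
    | nil => simp at h
    | cons y l' => simpa using ih l' (by simpa using h) (g s)

lemma foldl_flatMap {α β σ : Type} (f : σ → β → σ) (g : α → List β) :
    ∀ (l : List α) (s : σ), (l.flatMap g).foldl f s = l.foldl (fun s a => (g a).foldl f s) s := by
  intro l
  induction l with
  | nil => intro s; simp
  | cons a l ih => intro s; simp [List.flatMap_cons, List.foldl_append, ih]

theorem splitNum_eq_alt (num : Int) (h : 0 ≤ num) : splitNum num = splitNum_alt num := by
  have hdig := toChars_digits num h
  set cs := PySem.Int.toChars num with hcs
  set L : List Int := cs.map (fun c => (PySem.Int.ofChars? [c]).getD 0) with hL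
  have hLd : L = cs.map pvDval := rfl
  set cnt := cs.foldl splitB_cntStep (List.replicate 10 (0 : Int)) with hcnt
  obtain ⟨hlen, hget⟩ := cnt_fold_spec cs hdig (List.replicate 10 0) (by simp)
  rw [← hcnt] at hlen hget
  set E : List Int := (PySem.List.pyRange 0 10 1).flatMap
      (fun v => List.replicate (PySem.List.pyGetD cnt v 0).toNat v) with hE
  -- cnt[v] = count of v in L, for 0 ≤ v < 10
  have hcv : ∀ v : Int, 0 ≤ v → v < 10 → PySem.List.pyGetD cnt v 0 = (L.count v : Int) := by
    intro v h0 h10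
    have hj : v.toNat < 10 := by omega
    have hv' : ((v.toNat : Int)) = v := by omega
    have hrep : (List.replicate 10 (0 : Int)).getD v.toNat 0 = 0 := by
      simp only [List.getD_eq_getElem?_getD, List.getElem?_replicate]
      split <;> simp
    rw [PySem.List.pyGetD_of_nonneg _ _ h0, hget v.toNat hj, hrep, zero_add, hLd,
      List.count_eq_countP, List.countP_map]
    congr 1
    apply List.countP_congr
    intro c _
    simp [hv', Bool.beq_comm]
  -- every element of L is in [0,10)
  have hLmem : ∀ a ∈ L, 0 ≤ a ∧ a < 10 := by
    intro a ha
    rw [hLd] at ha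
    rcases List.mem_map.mp ha with ⟨c, hc, rfl⟩
    obtain ⟨k, hk, hdk⟩ := hdig c hc
    rw [hdk]
    exact ⟨Int.natCast_nonneg k, by exact_mod_cast hk⟩
  -- counting sort: the sorted list is the bucket concatenation
  have hsorted : PySem.List.sorted L (fun d => d) false = E := by
    apply PySem.List.sorted_id_eq_of_perm_of_pairwise
    · rw [List.perm_iff_count]
      intro a
      rw [hE, count_flatMap_replicate _ (PySem.List.nodup_pyRange_one 0 10)]
      by_cases ha : a ∈ PySem.List.pyRange 0 10 1
      · rcases PySem.List.mem_pyRange_one.mp ha with ⟨h0, h10⟩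
        rw [if_pos ha, hcv a h0 h10]
        omega
      · rw [if_neg ha, eq_comm, List.count_eq_zero]
        intro hmem
        exact ha (PySem.List.mem_pyRange_one.mpr (hLmem a hmem))
    · exact pairwise_flatMap_replicate _ (PySem.List.pairwise_lt_pyRange_one 0 10) _
  -- B's nested fold is the fold of splitB_emit over E
  have hB : (PySem.List.pyRange 0 10 1).foldl
      (fun st v => (PySem.List.pyRange 0 (PySem.List.pyGetD cnt v 0) 1).foldl
        (fun s _ => splitB_emit s v) st) ((0:Int),(0:Int),(0:Int))
      = E.foldl splitB_emit ((0:Int),(0:Int),(0:Int)) := by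
    rw [hE, foldl_flatMap]
    apply PySem.List.foldl_congr_mem
    intro s v hv
    have hrepl : (List.replicate (PySem.List.pyGetD cnt v 0).toNat v).foldl splitB_emit s
        = (List.replicate (PySem.List.pyGetD cnt v 0).toNat v).foldl (fun s _ => splitB_emit s v) s :=
      PySem.List.foldl_congr_mem _ _ _ _ (fun acc x hx => by rw [List.eq_of_mem_replicate hx])
    rw [hrepl]
    apply foldl_ignore
    rcases PySem.List.mem_pyRange_one.mp hv with ⟨h0, h10⟩
    have := hcv v h0 h10
    simp only [PySem.List.length_pyRange_one, List.length_replicate]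
    omega
  show (let digits := PySem.List.sorted L (fun d => d) false
        let p := (PySem.List.enumerate digits 0).foldl splitA_step (0, 0)
        p.1 + p.2)
      = (let st := (PySem.List.pyRange 0 10 1).foldl
          (fun st v => (PySem.List.pyRange 0 (PySem.List.pyGetD cnt v 0) 1).foldl
            (fun s _ => splitB_emit s v) st) ((0:Int),(0:Int),(0:Int))
         st.1 + st.2.1)
  simp only [hsorted, hB, run_eq E (0, 0) 0]

-- ===== VERDICT (by name: the statement is the Claim_ definition above) =====
theorem splitNum_spec : Claim_equal_splitNum := by
  intro num _ hpre
  unfold Spec_splitNum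
  exact splitNum_eq_alt num hpre
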